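-- pv_equiv track=rewrite | github.com/pbo-linaro/qemu-ci | scripts/qapi/golang/golang.py | fetch_indent_blocks_over_args
-- ===== SOURCE A (Python) =====
-- from typing import List, Optional, Tuple
--
-- def fetch_indent_blocks_over_args(
--     args: List[dict[str:str]],
-- ) -> Tuple[int, int]:
--     maxname, maxtype = 0, 0
--     blocks: tuple(int, int) = []
--     for arg in args:
--         if "comment" in arg or "doc" in arg:
--             blocks.append((maxname, maxtype))
--             maxname, maxtype = 0, 0
--
--             if "comment" in arg:
--                 # They are single blocks
--                 continue
--
--         if "type" not in arg:
--             # Embed type are on top of the struct and the following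
--             # fields do not consider it for formatting
--             blocks.append((maxname, maxtype))
--             maxname, maxtype = 0, 0
--             continue
--
--         maxname = max(maxname, len(arg.get("name", "")))
--         maxtype = max(maxtype, len(arg.get("type", "")))
--
--     blocks.append((maxname, maxtype))
--     return blocks
-- ===== SOURCE B (Python) =====
-- def fetch_indent_blocks_over_args(args):
--     # Pass 1: split args into groups using the same block boundaries.
--     groups = [[]]
--     for arg in args:
--         if "comment" in arg or "doc" in arg:
--             groups.append([])
--             if "comment" in arg:
--                 continue
--         if "type" not in arg:
--             groups.append([])
--             continue
--         groups[-1].append(arg)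
--     # Pass 2: reduce each group to its (max name length, max type length).
--     return [
--         (max((len(a.get("name", "")) for a in g), default=0),
--          max((len(a.get("type", "")) for a in g), default=0))
--         for g in groups
--     ]
-- ===== Notes on version B (the rewrite author's own statement) =====
-- stated objective: alternative
-- what changed: B first partitions the args into explicit groups at the block boundaries and then, in a separate pass, reduces each group to its (max name length, max type length) with max(..., default=0), instead of A's single loop tracking running maxima inline and appending/resetting them at each boundary.
import Mathlib
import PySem

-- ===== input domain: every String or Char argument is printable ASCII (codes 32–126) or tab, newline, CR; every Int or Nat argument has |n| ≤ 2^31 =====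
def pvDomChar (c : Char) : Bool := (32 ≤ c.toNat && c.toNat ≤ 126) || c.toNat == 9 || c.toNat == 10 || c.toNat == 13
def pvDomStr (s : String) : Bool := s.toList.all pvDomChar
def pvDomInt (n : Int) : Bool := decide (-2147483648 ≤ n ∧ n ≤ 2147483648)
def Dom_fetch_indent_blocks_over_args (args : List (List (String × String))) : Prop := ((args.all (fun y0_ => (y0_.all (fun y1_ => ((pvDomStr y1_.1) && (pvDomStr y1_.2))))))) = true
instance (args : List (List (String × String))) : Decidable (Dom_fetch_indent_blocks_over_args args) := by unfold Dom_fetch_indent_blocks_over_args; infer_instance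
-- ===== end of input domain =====

-- B partitions the args into explicit groups at the block boundaries, then reduces each
-- group to its (max name length, max type length) in a second pass, instead of A's single
-- loop with inline running maxima (objective: alternative decomposition; return value only).


-- shared helpers: '"k" in arg' and 'arg.get(k, "")' on the association list (first match)
def pvHasKey (d : List (String × String)) (k : String) : Bool := d.any (fun p => p.1 == k)
def pvGetD (d : List (String × String)) (k : String) : String :=
  ((d.find? (fun p => p.1 == k)).map Prod.snd).getD ""

-- ===== PORT A =====
-- body of A's for-loop, state = (maxname, maxtype, blocks)
def pvStepA (st : Int × Int × List (Int × Int)) (arg : List (String × String)) :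
    Int × Int × List (Int × Int) :=
  let maxname := st.1; let maxtype := st.2.1; let blocks := st.2.2
  if pvHasKey arg "comment" || pvHasKey arg "doc" then
    let blocks := blocks ++ [(maxname, maxtype)]
    if pvHasKey arg "comment" then (0, 0, blocks)
    else if !pvHasKey arg "type" then (0, 0, blocks ++ [((0 : Int), (0 : Int))])
    else (max 0 (PySem.Str.len (pvGetD arg "name")), max 0 (PySem.Str.len (pvGetD arg "type")), blocks)
  else if !pvHasKey arg "type" then (0, 0, blocks ++ [(maxname, maxtype)])
  else (max maxname (PySem.Str.len (pvGetD arg "name")),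
        max maxtype (PySem.Str.len (pvGetD arg "type")), blocks)

def fetch_indent_blocks_over_args (args : List (List (String × String))) : List (Int × Int) :=
  let st := args.foldl pvStepA (0, 0, [])
  st.2.2 ++ [(st.1, st.2.1)]

-- ===== PORT B =====
-- pass 1: state = (closed groups, current group); 'groups.append([])' closes the current group
def pvStepB (st : List (List (List (String × String))) × List (List (String × String)))
    (arg : List (String × String)) :
    List (List (List (String × String))) × List (List (String × String)) :=
  if pvHasKey arg "comment" || pvHasKey arg "doc" then
    let st := (st.1 ++ [st.2], ([] : List (List (String × String))))
    if pvHasKey arg "comment" then st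
    else if !pvHasKey arg "type" then (st.1 ++ [st.2], [])
    else (st.1, st.2 ++ [arg])
  else if !pvHasKey arg "type" then (st.1 ++ [st.2], [])
  else (st.1, st.2 ++ [arg])

-- pass 2: max((len(a.get(k,"")) for a in g), default=0)
def pvMaxName (g : List (List (String × String))) : Int :=
  g.foldl (fun m a => max m (PySem.Str.len (pvGetD a "name"))) 0
def pvMaxType (g : List (List (String × String))) : Int :=
  g.foldl (fun m a => max m (PySem.Str.len (pvGetD a "type"))) 0

def fetch_indent_blocks_over_args_alt (args : List (List (String × String))) : List (Int × Int) :=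
  let st := args.foldl pvStepB ([], [])
  (st.1 ++ [st.2]).map (fun g => (pvMaxName g, pvMaxType g))

-- ===== PRECONDITION & SPEC =====
def Spec_fetch_indent_blocks_over_args (args : List (List (String × String))) (out : List (Int × Int)) : Prop := out = fetch_indent_blocks_over_args_alt args
instance (args : List (List (String × String))) (out : List (Int × Int)) : Decidable (Spec_fetch_indent_blocks_over_args args out) := by unfold Spec_fetch_indent_blocks_over_args; infer_instance

-- ===== CLAIM (what is proved, stated in full; the proofs are below) =====
def Claim_equal_fetch_indent_blocks_over_args : Prop := ∀ (args : List (List (String × String))), Dom_fetch_indent_blocks_over_args args → Spec_fetch_indent_blocks_over_args args (fetch_indent_blocks_over_args args)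

-- ===== LEMMAS AND PROOFS =====
def pvRed (g : List (List (String × String))) : Int × Int := (pvMaxName g, pvMaxType g)

theorem pvMaxName_append (g : List (List (String × String))) (a : List (String × String)) :
    pvMaxName (g ++ [a]) = max (pvMaxName g) (PySem.Str.len (pvGetD a "name")) := by
  simp [pvMaxName]

theorem pvMaxType_append (g : List (List (String × String))) (a : List (String × String)) :
    pvMaxType (g ++ [a]) = max (pvMaxType g) (PySem.Str.len (pvGetD a "type")) := by
  simp [pvMaxType]

theorem pv_loop_eq : ∀ (args : List (List (String × String)))
    (done : List (List (List (String × String)))) (cur : List (List (String × String))),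
    (let st := args.foldl pvStepA (pvMaxName cur, pvMaxType cur, done.map pvRed)
     st.2.2 ++ [(st.1, st.2.1)])
    = (let st := args.foldl pvStepB (done, cur)
       (st.1 ++ [st.2]).map pvRed) := by
  intro args
  induction args with
  | nil =>
    intro done cur
    simp [pvRed]
  | cons arg rest ih =>
    intro done cur
    simp only [List.foldl_cons]
    by_cases hc : pvHasKey arg "comment" = true
    · have h1 : pvStepA (pvMaxName cur, pvMaxType cur, done.map pvRed) arg
          = (pvMaxName [], pvMaxType [], ((done ++ [cur]).map pvRed)) := by
        simp [pvStepA, hc, pvRed, pvMaxName, pvMaxType]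
      have h2 : pvStepB (done, cur) arg = (done ++ [cur], []) := by
        simp [pvStepB, hc]
      rw [h1, h2]; exact ih (done ++ [cur]) []
    · by_cases hd : pvHasKey arg "doc" = true
      · by_cases ht : pvHasKey arg "type" = true
        · have h1 : pvStepA (pvMaxName cur, pvMaxType cur, done.map pvRed) arg
              = (pvMaxName [arg], pvMaxType [arg], ((done ++ [cur]).map pvRed)) := by
            simp [pvStepA, hc, hd, ht, pvRed, pvMaxName, pvMaxType]
          have h2 : pvStepB (done, cur) arg = (done ++ [cur], [arg]) := by
            simp [pvStepB, hc, hd, ht]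
          rw [h1, h2]; exact ih (done ++ [cur]) [arg]
        · have h1 : pvStepA (pvMaxName cur, pvMaxType cur, done.map pvRed) arg
              = (pvMaxName [], pvMaxType [], ((done ++ [cur] ++ [[]]).map pvRed)) := by
            simp [pvStepA, hc, hd, ht, pvRed, pvMaxName, pvMaxType]
          have h2 : pvStepB (done, cur) arg = (done ++ [cur] ++ [[]], []) := by
            simp [pvStepB, hc, hd, ht]
          rw [h1, h2]; exact ih (done ++ [cur] ++ [[]]) []
      · by_cases ht : pvHasKey arg "type" = true
        · have h1 : pvStepA (pvMaxName cur, pvMaxType cur, done.map pvRed) arg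
              = (pvMaxName (cur ++ [arg]), pvMaxType (cur ++ [arg]), done.map pvRed) := by
            simp [pvStepA, hc, hd, ht, pvMaxName_append, pvMaxType_append]
          have h2 : pvStepB (done, cur) arg = (done, cur ++ [arg]) := by
            simp [pvStepB, hc, hd, ht]
          rw [h1, h2]; exact ih done (cur ++ [arg])
        · have h1 : pvStepA (pvMaxName cur, pvMaxType cur, done.map pvRed) arg
              = (pvMaxName [], pvMaxType [], ((done ++ [cur]).map pvRed)) := by
            simp [pvStepA, hc, hd, ht, pvRed, pvMaxName, pvMaxType]
          have h2 : pvStepB (done, cur) arg = (done ++ [cur], []) := by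
            simp [pvStepB, hc, hd, ht]
          rw [h1, h2]; exact ih (done ++ [cur]) []

-- ===== VERDICT (by name: the statement is the Claim_ definition above) =====
theorem fetch_indent_blocks_over_args_spec : Claim_equal_fetch_indent_blocks_over_args := by
  intro args _
  unfold Spec_fetch_indent_blocks_over_args fetch_indent_blocks_over_args fetch_indent_blocks_over_args_alt
  have := pv_loop_eq args [] []
  simpa [pvMaxName, pvMaxType, pvRed] using this
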